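-- pv_equiv track=rewrite | github.com/PARK4139/task_orchestrator_cli | pkg_py/refactor/ensure_file_contents_filled_with_auto_no_option2.py | ensure_file_contents_filled_with_auto_no_option2
-- ===== SOURCE A (Python) =====
-- def ensure_file_contents_filled_with_auto_no_option2(template_str: str, word_monitored: str, auto_cnt_starting_no=0):
--     """
--     input
--     --------
--     -----1--
--     ---1----
--     ---1----
--     -------1
--     ouput
--     --------
--     -----1--
--     ---2----
--     ---3----
--     -------4
--     """
--     line_splited_by_word_monitored_list = template_str.split(word_monitored)
--
--     line_list_filtered = []
--     for index, line_splited_by_word_monitored in enumerate(line_splited_by_word_monitored_list):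
--         if index != len(line_splited_by_word_monitored_list) - 1:
--             line_list_filtered.append(line_splited_by_word_monitored + str(auto_cnt_starting_no))
--             auto_cnt_starting_no = auto_cnt_starting_no + 1
--         else:
--             line_list_filtered.append(line_splited_by_word_monitored)
--     lines_new_as_str = "".join(line_list_filtered)
--     return lines_new_as_str
-- ===== SOURCE B (Python) =====
-- def ensure_file_contents_filled_with_auto_no_option2(template_str: str, word_monitored: str, auto_cnt_starting_no=0):
--     result = ""
--     remaining = template_str
--     while True:
--         head, sep, tail = remaining.partition(word_monitored)
--         if not sep:
--             return result + head
--         result += head + str(auto_cnt_starting_no)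
--         auto_cnt_starting_no += 1
--         remaining = tail
-- ===== Notes on version B (the rewrite author's own statement) =====
-- stated objective: simpler
-- what changed: Replaces split+enumerate+len-based last-index test+join with a single left-to-right str.partition loop over a shrinking remainder accumulating the result string directly.
import Mathlib
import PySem

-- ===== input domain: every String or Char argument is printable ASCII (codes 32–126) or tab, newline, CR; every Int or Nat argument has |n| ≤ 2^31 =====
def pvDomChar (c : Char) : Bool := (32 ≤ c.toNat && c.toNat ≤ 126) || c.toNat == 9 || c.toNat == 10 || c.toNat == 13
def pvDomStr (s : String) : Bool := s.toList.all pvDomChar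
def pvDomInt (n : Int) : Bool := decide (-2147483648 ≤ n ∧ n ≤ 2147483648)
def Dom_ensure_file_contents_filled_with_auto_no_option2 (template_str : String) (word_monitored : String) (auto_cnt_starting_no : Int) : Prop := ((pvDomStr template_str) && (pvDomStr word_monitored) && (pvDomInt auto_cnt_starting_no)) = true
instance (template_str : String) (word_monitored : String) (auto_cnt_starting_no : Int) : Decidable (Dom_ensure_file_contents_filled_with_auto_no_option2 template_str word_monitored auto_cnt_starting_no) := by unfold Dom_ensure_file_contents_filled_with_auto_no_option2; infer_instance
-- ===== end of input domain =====

-- B replaces split+enumerate+last-index test+join by a single str.partition loop over a shrinking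
-- remainder that accumulates the result string directly (objective: simpler decomposition).
-- ===== PORT A =====
-- step of A's enumerate loop: non-last pieces get str(counter) appended and the counter bumped
def pvStepA (n : Int) (st : List (List Char) × Int) (ip : Int × List Char) : List (List Char) × Int :=
  if ip.1 ≠ n - 1 then (st.1 ++ [ip.2 ++ (PySem.Int.toStr st.2).toList], st.2 + 1)
  else (st.1 ++ [ip.2], st.2)

def ensure_file_contents_filled_with_auto_no_option2 (template_str : String) (word_monitored : String) (auto_cnt_starting_no : Int) : String :=
  -- template_str.split(word_monitored); none = ValueError('empty separator'), excluded by Pre_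
  let parts : List (List Char) := (PySem.Chars.split? template_str.toList word_monitored.toList).getD []
  let st := (PySem.List.enumerate parts).foldl (pvStepA (parts.length : Int)) ([], auto_cnt_starting_no)
  String.ofList (PySem.Chars.join [] st.1)

-- ===== PORT B =====
-- hand port of str.partition for nonempty separator, as (head, tail); none = separator absent
-- (exact for sep ≠ []; Python raises ValueError on sep = '', excluded by Pre_)
def pvPartition (s sep : List Char) : Option (List Char × List Char) :=
  match s with
  | [] => none
  | c :: rest =>
    if sep.isPrefixOf (c :: rest) then some ([], rest.drop (sep.length - 1))
    else (pvPartition rest sep).map (fun ht => (c :: ht.1, ht.2))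

theorem pvPartition_some_lt (s sep h t : List Char) (hp : pvPartition s sep = some (h, t)) :
    t.length < s.length := by
  induction s generalizing h t with
  | nil => simp [pvPartition] at hp
  | cons c rest ih =>
    rw [pvPartition] at hp
    split at hp
    · obtain ⟨rfl, rfl⟩ : h = [] ∧ t = rest.drop (sep.length - 1) := by
        simpa using hp.symm
      simp only [List.length_drop, List.length_cons]
      omega
    · cases hq : pvPartition rest sep with
      | none => simp [hq] at hp
      | some ht =>
        simp only [hq, Option.map_some, Option.some.injEq, Prod.mk.injEq] at hp
        obtain ⟨-, rfl⟩ := hp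
        exact Nat.lt_trans (ih ht.1 ht.2 (by simpa using hq)) (by simp)

-- the while-True loop of B: result accumulator, shrinking remainder, incrementing counter
def pvAltGo (sep acc remaining : List Char) (cnt : Int) : List Char :=
  match hp : pvPartition remaining sep with
  | none => acc ++ remaining
  | some (hd, tl) => pvAltGo sep (acc ++ hd ++ (PySem.Int.toStr cnt).toList) tl (cnt + 1)
termination_by remaining.length
decreasing_by exact pvPartition_some_lt _ _ _ _ hp

def ensure_file_contents_filled_with_auto_no_option2_alt (template_str : String) (word_monitored : String) (auto_cnt_starting_no : Int) : String :=
  String.ofList (pvAltGo word_monitored.toList [] template_str.toList auto_cnt_starting_no)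

-- ===== PRECONDITION & SPEC =====
-- Pre_ excludes only word_monitored = "", where both A (str.split) and B (str.partition) raise
-- ValueError('empty separator').
def Pre_ensure_file_contents_filled_with_auto_no_option2 (_template_str : String) (word_monitored : String) (_auto_cnt_starting_no : Int) : Prop :=
  word_monitored ≠ ""
instance (template_str : String) (word_monitored : String) (auto_cnt_starting_no : Int) : Decidable (Pre_ensure_file_contents_filled_with_auto_no_option2 template_str word_monitored auto_cnt_starting_no) := by unfold Pre_ensure_file_contents_filled_with_auto_no_option2; infer_instance

def pvWitness_ensure_file_contents_filled_with_auto_no_option2 : String × String × Int := ("--x--x-", "x", 3)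

def Spec_ensure_file_contents_filled_with_auto_no_option2 (template_str : String) (word_monitored : String) (auto_cnt_starting_no : Int) (out : String) : Prop := out = ensure_file_contents_filled_with_auto_no_option2_alt template_str word_monitored auto_cnt_starting_no
instance (template_str : String) (word_monitored : String) (auto_cnt_starting_no : Int) (out : String) : Decidable (Spec_ensure_file_contents_filled_with_auto_no_option2 template_str word_monitored auto_cnt_starting_no out) := by unfold Spec_ensure_file_contents_filled_with_auto_no_option2; infer_instance

-- ===== CLAIM (what is proved, stated in full; the proofs are below) =====
def Claim_equal_ensure_file_contents_filled_with_auto_no_option2 : Prop := ∀ (template_str : String) (word_monitored : String) (auto_cnt_starting_no : Int), Dom_ensure_file_contents_filled_with_auto_no_option2 template_str word_monitored auto_cnt_starting_no → Pre_ensure_file_contents_filled_with_auto_no_option2 template_str word_monitored auto_cnt_starting_no → Spec_ensure_file_contents_filled_with_auto_no_option2 template_str word_monitored auto_cnt_starting_no (ensure_file_contents_filled_with_auto_no_option2 template_str word_monitored auto_cnt_starting_no)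

-- ===== LEMMAS AND PROOFS =====

-- reference split: scan char by char, pre = current piece so far
def pvFsplit (sep pre l : List Char) : List (List Char) :=
  match l with
  | [] => [pre]
  | c :: rest =>
    if sep.isPrefixOf (c :: rest) then pre :: pvFsplit sep [] (rest.drop (sep.length - 1))
    else pvFsplit sep (pre ++ [c]) rest
termination_by l.length
decreasing_by
  · simp only [List.length_drop, List.length_cons]; omega
  · simp

-- the intended joined output: every piece but the last followed by str(counter)
def pvTagFlat : List (List Char) → Int → List Char
  | [], _ => []
  | [p], _ => p
  | p :: q :: rest, c => p ++ (PySem.Int.toStr c).toList ++ pvTagFlat (q :: rest) (c + 1)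

theorem pvGo_eq (sep : List Char) (hs : sep ≠ []) :
    ∀ (fuel : Nat) (l cur : List Char) (acc : List (List Char)) (_ : l.length < fuel),
      PySem.Chars.splitOn.go sep fuel l cur acc
        = acc.reverse ++ pvFsplit sep cur.reverse l := by
  intro fuel
  induction fuel with
  | zero => intro l cur acc h; omega
  | succ fuel ih =>
    intro l cur acc h
    cases l with
    | nil =>
      rw [PySem.Chars.splitOn.go, pvFsplit]
      · simp
      · omega
    | cons c rest =>
      rw [PySem.Chars.splitOn.go, pvFsplit]
      obtain ⟨m, hm⟩ : ∃ m, sep.length = m + 1 := by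
        cases sep with
        | nil => exact absurd rfl hs
        | cons a b => exact ⟨b.length, by simp⟩
      by_cases hpf : sep.isPrefixOf (c :: rest)
      · simp only [hpf, if_true]
        rw [ih]
        · simp [hm]
        · simp only [hm, List.length_drop, List.length_cons] at *
          omega
      · simp only [hpf]
        rw [ih rest (c :: cur) acc (by simp at h ⊢; omega)]
        simp

theorem pvSplitOn_eq (sep l : List Char) (hs : sep ≠ []) :
    PySem.Chars.splitOn l sep = pvFsplit sep [] l := by
  rw [PySem.Chars.splitOn, pvGo_eq sep hs (l.length + 1) l [] [] (by omega)]
  simp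

theorem pvFsplit_partition (sep : List Char) :
    ∀ (l pre : List Char),
      pvFsplit sep pre l =
        match pvPartition l sep with
        | none => [pre ++ l]
        | some ht => (pre ++ ht.1) :: pvFsplit sep [] ht.2 := by
  intro l
  induction l with
  | nil => intro pre; simp [pvFsplit, pvPartition]
  | cons c rest ih =>
    intro pre
    rw [pvFsplit, pvPartition]
    by_cases hpf : sep.isPrefixOf (c :: rest)
    · simp [hpf]
    · simp only [hpf, ih (pre ++ [c])]
      cases hq : pvPartition rest sep with
      | none => simp
      | some ht => simp

theorem pvFsplit_ne_nil (sep pre l : List Char) : pvFsplit sep pre l ≠ [] := by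
  rw [pvFsplit_partition]
  cases pvPartition l sep <;> simp

theorem pvAltGo_eq (sep : List Char) :
    ∀ (l acc : List Char) (cnt : Int),
      pvAltGo sep acc l cnt = acc ++ pvTagFlat (pvFsplit sep [] l) cnt := by
  intro l
  induction hn : l.length using Nat.strong_induction_on generalizing l with
  | _ n ih =>
    intro acc cnt
    rw [pvAltGo]
    cases hp : pvPartition l sep with
    | none =>
      rw [pvFsplit_partition]
      simp [hp, pvTagFlat]
    | some ht =>
      obtain ⟨hd, tl⟩ := ht
      rw [pvFsplit_partition]
      simp only [hp]
      rcases hr : pvFsplit sep [] tl with _ | ⟨x, xs⟩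
      · exact absurd hr (pvFsplit_ne_nil sep [] tl)
      · have hlt : tl.length < n := hn ▸ pvPartition_some_lt l sep hd tl hp
        rw [ih tl.length hlt tl rfl (acc ++ hd ++ (PySem.Int.toStr cnt).toList) (cnt + 1)]
        simp [pvTagFlat, hr]

theorem pvJoinNil (xs : List (List Char)) : PySem.Chars.join [] xs = xs.flatten := by
  unfold PySem.Chars.join
  induction xs with
  | nil => simp [List.intercalate]
  | cons p t ih =>
    cases t with
    | nil => simp [List.intercalate]
    | cons q r =>
      simp only [List.intercalate, List.intersperse] at *
      simp_all

theorem pvFoldA (n : Int) :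
    ∀ (parts : List (List Char)) (k : Int) (acc : List (List Char)) (cnt : Int),
      k + parts.length = n →
      PySem.Chars.join [] (((PySem.List.enumerate parts k).foldl (pvStepA n) (acc, cnt)).1)
        = PySem.Chars.join [] acc ++ pvTagFlat parts cnt := by
  intro parts
  induction parts with
  | nil => intro k acc cnt hk; simp [PySem.List.enumerate, pvTagFlat]
  | cons p rest ih =>
    intro k acc cnt hk
    cases rest with
    | nil =>
      have hk1 : k = n - 1 := by simp at hk; omega
      simp [PySem.List.enumerate, pvStepA, hk1, pvTagFlat, pvJoinNil]
    | cons q rs =>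
      have hkne : k ≠ n - 1 := by simp at hk; omega
      have he : PySem.List.enumerate (p :: q :: rs) k
          = (k, p) :: PySem.List.enumerate (q :: rs) (k + 1) := by
        simp [PySem.List.enumerate]
      rw [he, List.foldl_cons]
      have hst : pvStepA n (acc, cnt) (k, p)
          = (acc ++ [p ++ (PySem.Int.toStr cnt).toList], cnt + 1) := by
        simp [pvStepA, hkne]
      rw [hst, ih (k + 1) (acc ++ [p ++ (PySem.Int.toStr cnt).toList]) (cnt + 1)
        (by simp at hk ⊢; omega)]
      simp [pvJoinNil, pvTagFlat]

-- ===== VERDICT (by name: the statement is the Claim_ definition above) =====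
theorem ensure_file_contents_filled_with_auto_no_option2_spec : Claim_equal_ensure_file_contents_filled_with_auto_no_option2 := by
  intro t w cnt _ hpre
  unfold Spec_ensure_file_contents_filled_with_auto_no_option2
  unfold ensure_file_contents_filled_with_auto_no_option2 ensure_file_contents_filled_with_auto_no_option2_alt
  have hw : w.toList ≠ [] := by
    intro h
    exact hpre (by simpa using congrArg String.ofList h)
  have hsp : PySem.Chars.split? t.toList w.toList
      = some (PySem.Chars.splitOn t.toList w.toList) := by
    simp [PySem.Chars.split?, hw]
  simp only [hsp, Option.getD_some, pvSplitOn_eq w.toList t.toList hw]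
  rw [pvFoldA ((pvFsplit w.toList [] t.toList).length : Int) (pvFsplit w.toList [] t.toList) 0 []
      cnt (by simp), pvAltGo_eq w.toList t.toList [] cnt]
  simp
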